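-- pv_equiv track=rewrite | github.com/Marcin-Szadkowski/Security-In-Cloud-Computing | pop/utils.py | partition_file
-- ===== SOURCE A (Python) =====
-- def partition_file(z_blocks: int, lines: list[str]) -> list[str]:
--     """Divide file lines into z blocks"""
--     k, m = divmod(len(lines), z_blocks)
--     z_lines = (
--         lines[i * k + min(i, m) : (i + 1) * k + min(i + 1, m)] for i in range(z_blocks)
--     )
--     chunks = []
--     for _lines in z_lines:
--         chunks.append("".join(_lines))
--     return chunks
-- ===== SOURCE B (Python) =====
-- def partition_file(z_blocks: int, lines: list[str]) -> list[str]: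
--     """Divide file lines into z blocks: classify each line by its block index
--     and bucket it -- no slicing, one pass over the lines."""
--     k, m = divmod(len(lines), z_blocks)
--     split = m * (k + 1)
--     chunks = [""] * z_blocks
--     for j, line in enumerate(lines):
--         b = j // (k + 1) if j < split else m + (j - split) // k
--         chunks[b] += line
--     return chunks
-- ===== Notes on version B (the rewrite author's own statement) =====
-- stated objective: alternative
-- what changed: Instead of slicing the list per block with the boundary formula i*k+min(i,m), B inverts that mapping: it classifies each line index j into its block number (j//(k+1) in the first m oversized blocks, else m+(j-split)//k) and accumulates each line into a preallocated bucket array in a single pass over the lines, never slicing.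
-- outside the precondition, e.g. on partition_file(0, ['a']): A raises ZeroDivisionError, B raises ZeroDivisionError; on partition_file(-2, ['a']): A returns [], B raises IndexError
import Mathlib
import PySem

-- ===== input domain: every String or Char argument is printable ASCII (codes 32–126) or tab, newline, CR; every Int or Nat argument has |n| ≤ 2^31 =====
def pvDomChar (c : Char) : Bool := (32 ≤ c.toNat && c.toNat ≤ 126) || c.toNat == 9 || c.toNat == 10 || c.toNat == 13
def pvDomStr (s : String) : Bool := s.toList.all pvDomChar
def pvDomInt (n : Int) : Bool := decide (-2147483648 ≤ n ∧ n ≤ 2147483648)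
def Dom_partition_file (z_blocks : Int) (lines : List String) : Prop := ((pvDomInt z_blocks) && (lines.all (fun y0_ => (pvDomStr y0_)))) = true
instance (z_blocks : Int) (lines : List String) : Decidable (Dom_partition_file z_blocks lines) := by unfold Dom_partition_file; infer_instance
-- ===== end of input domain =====

-- B inverts A's mapping: instead of slicing out each block with the boundary
-- formula i*k+min(i,m), it classifies each line index into its block number and
-- accumulates the line into a preallocated bucket array in one pass (alternative
-- algorithm, same cost).

-- ===== PORT A =====
def partition_file (z_blocks : Int) (lines : List String) : List String :=
  match PySem.Int.divmod? (lines.length : Int) z_blocks with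
  | none => []   -- z_blocks = 0: Python raises ZeroDivisionError; excluded by Pre_
  | some (k, m) =>
    ((PySem.List.pyRange 0 z_blocks 1).map
        (fun i => PySem.List.slice lines (some (i * k + min i m)) (some ((i + 1) * k + min (i + 1) m)))).foldl
      (fun chunks l => chunks ++ [PySem.Str.join "" l]) []

-- ===== PORT B =====
-- chunks[b] += line is ported with pyGetD/pySetD, the total forms of Python's
-- indexing; under Pre_ the computed bucket b is always in range (the IndexError
-- that negative z_blocks with nonempty lines would raise lies outside Pre_).
def partition_file_alt (z_blocks : Int) (lines : List String) : List String :=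
  match PySem.Int.divmod? (lines.length : Int) z_blocks with
  | none => []   -- z_blocks = 0: Python raises ZeroDivisionError; excluded by Pre_
  | some (k, m) =>
    let split := m * (k + 1)
    (PySem.List.enumerate lines 0).foldl
      (fun chunks jl =>
        let b := if jl.1 < split then PySem.Int.floordiv jl.1 (k + 1)
                 else m + PySem.Int.floordiv (jl.1 - split) k
        PySem.List.pySetD chunks b (PySem.List.pyGetD chunks b "" ++ jl.2))
      (PySem.List.pyRepeat [""] z_blocks)

-- ===== PRECONDITION & SPEC =====
-- Pre_ excludes z_blocks = 0, where A raises ZeroDivisionError, and negative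
-- z_blocks with a nonempty list — a block count outside the task's natural
-- domain, where A returns [] from an empty range while B raises IndexError.
def Pre_partition_file (z_blocks : Int) (lines : List String) : Prop :=
  0 < z_blocks ∨ (z_blocks < 0 ∧ lines = [])
instance (z_blocks : Int) (lines : List String) : Decidable (Pre_partition_file z_blocks lines) := by unfold Pre_partition_file; infer_instance
def pvWitness_partition_file : Int × List String := (2, ["a", "b", "c"])

def Spec_partition_file (z_blocks : Int) (lines : List String) (out : List String) : Prop := out = partition_file_alt z_blocks lines
instance (z_blocks : Int) (lines : List String) (out : List String) : Decidable (Spec_partition_file z_blocks lines out) := by unfold Spec_partition_file; infer_instance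

-- ===== CLAIM (what is proved, stated in full; the proofs are below) =====
def Claim_equal_partition_file : Prop := ∀ (z_blocks : Int) (lines : List String), Dom_partition_file z_blocks lines → Pre_partition_file z_blocks lines → Spec_partition_file z_blocks lines (partition_file z_blocks lines)

-- ===== LEMMAS AND PROOFS =====

-- A's block boundary: block i starts at line index i*k + min(i, m).
def pvStart (k m i : Int) : Int := i * k + min i m

lemma pvStart_mono (k m : Int) (hk : 0 ≤ k) {i j : Int} (hij : i ≤ j) :
    pvStart k m i ≤ pvStart k m j := by
  unfold pvStart
  have h1 : i * k ≤ j * k := mul_le_mul_of_nonneg_right hij hk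
  omega

lemma pvStart_zero (k m : Int) (hm : 0 ≤ m) : pvStart k m 0 = 0 := by
  unfold pvStart; omega

lemma pvStart_last (k m z : Int) (hmz : m ≤ z) : pvStart k m z = z * k + m := by
  unfold pvStart; omega

-- "".join over a list of strings with one more element appended.
lemma pv_chars_join_nil (l : List (List Char)) : PySem.Chars.join [] l = l.flatten := by
  induction l with
  | nil => simp [PySem.Chars.join_nil]
  | cons p rest ih =>
    cases rest with
    | nil => simp [PySem.Chars.join_singleton]
    | cons q r => simp_all [PySem.Chars.join_cons_cons]

lemma pv_str_join_snoc (xs : List String) (y : String) :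
    PySem.Str.join "" (xs ++ [y]) = PySem.Str.join "" xs ++ y := by
  simp [PySem.Str.join, pv_chars_join_nil]

-- An Int slice with nonnegative bounds end ≤ start is empty.
lemma pv_slice_empty {α : Type} (xs : List α) (a b : Int) (ha : 0 ≤ a) (hb : 0 ≤ b)
    (hba : b ≤ a) : PySem.List.slice xs (some a) (some b) = [] := by
  rw [PySem.List.slice_toNat xs ha hb]
  have : b.toNat - a.toNat = 0 := by omega
  simp [this]

-- Extending a slice by one element at index t.
lemma pv_slice_snoc {α : Type} (xs : List α) (a : Int) (t : Nat) (ha : 0 ≤ a)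
    (hat : a ≤ (t : Int)) (ht : t < xs.length) :
    PySem.List.slice xs (some a) (some ((t : Int) + 1)) =
      PySem.List.slice xs (some a) (some (t : Int)) ++ [xs[t]] := by
  rw [PySem.List.slice_toNat xs ha (by omega), PySem.List.slice_toNat xs ha (by omega)]
  have h1 : ((t : Int) + 1).toNat = t + 1 := by omega
  have h2 : ((t : Int)).toNat = t := by omega
  rw [h1, h2]
  have h3 : t + 1 - a.toNat = (t - a.toNat) + 1 := by omega
  rw [h3, List.take_succ]
  congr 1
  have : (xs.drop a.toNat)[t - a.toNat]? = some xs[t] := by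
    rw [List.getElem?_drop]
    have : a.toNat + (t - a.toNat) = t := by omega
    rw [this]
    exact List.getElem?_eq_getElem ht
  simp [this]

-- B's classification of a line index t lands in the block that A's boundary
-- formula assigns to t.
lemma pv_classify (k m z t : Int) (hz : 0 < z) (hk : 0 ≤ k) (hm0 : 0 ≤ m) (hmz : m < z)
    (ht0 : 0 ≤ t) (htn : t < k * z + m) :
    0 ≤ (if t < m * (k + 1) then PySem.Int.floordiv t (k + 1)
         else m + PySem.Int.floordiv (t - m * (k + 1)) k) ∧
    (if t < m * (k + 1) then PySem.Int.floordiv t (k + 1)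
         else m + PySem.Int.floordiv (t - m * (k + 1)) k) < z ∧
    pvStart k m (if t < m * (k + 1) then PySem.Int.floordiv t (k + 1)
         else m + PySem.Int.floordiv (t - m * (k + 1)) k) ≤ t ∧
    t < pvStart k m ((if t < m * (k + 1) then PySem.Int.floordiv t (k + 1)
         else m + PySem.Int.floordiv (t - m * (k + 1)) k) + 1) := by
  split
  · -- t < m*(k+1): block q = t // (k+1), one of the first m blocks of size k+1
    rename_i hlt
    rw [PySem.Int.floordiv_eq_ediv_of_pos (by omega)]
    set q := t / (k + 1) with hq
    have hdm : (k + 1) * q + t % (k + 1) = t := Int.ediv_add_emod t (k + 1)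
    have hr0 : 0 ≤ t % (k + 1) := Int.emod_nonneg t (by omega)
    have hrk : t % (k + 1) < k + 1 := Int.emod_lt_of_pos t (by omega)
    have hq0 : 0 ≤ q := Int.ediv_nonneg ht0 (by omega)
    have hqm : q < m := by
      by_contra h
      rw [not_lt] at h
      have : m * (k + 1) ≤ q * (k + 1) := mul_le_mul_of_nonneg_right h (by omega)
      nlinarith
    refine ⟨hq0, by omega, ?_, ?_⟩
    · unfold pvStart
      have : min q m = q := by omega
      nlinarith
    · unfold pvStart
      have : min (q + 1) m = q + 1 := by omega
      nlinarith
  · -- t ≥ m*(k+1): block m + (t - split) // k, of size k (and k ≥ 1 here)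
    rename_i hge
    rw [not_lt] at hge
    have hk1 : 1 ≤ k := by nlinarith
    rw [PySem.Int.floordiv_eq_ediv_of_pos (by omega)]
    set s := t - m * (k + 1) with hs
    set q := s / k with hq
    have hdm : k * q + s % k = s := Int.ediv_add_emod s k
    have hr0 : 0 ≤ s % k := Int.emod_nonneg s (by omega)
    have hrk : s % k < k := Int.emod_lt_of_pos s (by omega)
    have hq0 : 0 ≤ q := Int.ediv_nonneg (by omega) (by omega)
    have hqz : q < z - m := by
      by_contra h
      rw [not_lt] at h
      have : (z - m) * k ≤ q * k := mul_le_mul_of_nonneg_right h (by omega)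
      nlinarith
    refine ⟨by omega, by omega, ?_, ?_⟩
    · unfold pvStart
      have : min (m + q) m = m := by omega
      nlinarith
    · unfold pvStart
      have : min (m + q + 1) m = m := by omega
      nlinarith

-- The bucket-fold invariant: after consuming the lines before index t, bucket i
-- holds the join of A's block-i slice truncated at t.
lemma pv_bucket_inv (lines : List String) (k m z : Int)
    (hz : 0 < z) (hk : 0 ≤ k) (hm0 : 0 ≤ m) (hmz : m < z)
    (hn : k * z + m = (lines.length : Int)) :
    ∀ (suffix : List String) (t : Nat), lines.drop t = suffix →
    (PySem.List.enumerate suffix (t : Int)).foldl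
        (fun chunks jl =>
          let b := if jl.1 < m * (k + 1) then PySem.Int.floordiv jl.1 (k + 1)
                   else m + PySem.Int.floordiv (jl.1 - m * (k + 1)) k
          PySem.List.pySetD chunks b (PySem.List.pyGetD chunks b "" ++ jl.2))
        ((PySem.List.pyRange 0 z 1).map
          (fun i => PySem.Str.join "" (PySem.List.slice lines (some (pvStart k m i)) (some (min (t : Int) (pvStart k m (i + 1)))))))
    = (PySem.List.pyRange 0 z 1).map
        (fun i => PySem.Str.join "" (PySem.List.slice lines (some (pvStart k m i)) (some (pvStart k m (i + 1))))) := by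
  intro suffix
  induction suffix with
  | nil =>
    intro t hdrop
    have hlen : lines.length ≤ t := by
      by_contra h
      rw [not_le] at h
      have := List.drop_eq_nil_iff.mp hdrop
      omega
    rw [PySem.List.enumerate_nil, List.foldl_nil]
    apply List.map_congr_left
    intro i hi
    rw [PySem.List.mem_pyRange_one] at hi
    have hle : pvStart k m (i + 1) ≤ (lines.length : Int) := by
      have h2 := pvStart_mono k m hk (show i + 1 ≤ z by omega)
      rw [pvStart_last k m z (by omega)] at h2
      have hcomm : z * k = k * z := mul_comm z k
      omega
    have : min (t : Int) (pvStart k m (i + 1)) = pvStart k m (i + 1) := by omega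
    rw [this]
  | cons x rest ih =>
    intro t hdrop
    have ht : t < lines.length := by
      by_contra h
      rw [not_lt] at h
      rw [List.drop_eq_nil_iff.mpr h] at hdrop
      simp at hdrop
    have hx : lines[t] = x := by
      have h0 : (lines.drop t)[0]'(by rw [hdrop]; simp) = x := by simp [hdrop]
      rw [List.getElem_drop] at h0
      simpa using h0
    have hrest : lines.drop (t + 1) = rest := by
      have : lines.drop (t + 1) = (lines.drop t).tail := by
        rw [← List.drop_drop]
        simp
      rw [this, hdrop, List.tail_cons]
    rw [PySem.List.enumerate_cons, List.foldl_cons]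
    have hstep :
        (let b := if (t : Int) < m * (k + 1) then PySem.Int.floordiv (t : Int) (k + 1)
                  else m + PySem.Int.floordiv ((t : Int) - m * (k + 1)) k
         PySem.List.pySetD
           ((PySem.List.pyRange 0 z 1).map
             (fun i => PySem.Str.join "" (PySem.List.slice lines (some (pvStart k m i)) (some (min (t : Int) (pvStart k m (i + 1)))))))
           b
           (PySem.List.pyGetD
             ((PySem.List.pyRange 0 z 1).map
               (fun i => PySem.Str.join "" (PySem.List.slice lines (some (pvStart k m i)) (some (min (t : Int) (pvStart k m (i + 1)))))))
             b "" ++ x))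
        = (PySem.List.pyRange 0 z 1).map
            (fun i => PySem.Str.join "" (PySem.List.slice lines (some (pvStart k m i)) (some (min ((t : Int) + 1) (pvStart k m (i + 1)))))) := by
      set b := if (t : Int) < m * (k + 1) then PySem.Int.floordiv (t : Int) (k + 1)
               else m + PySem.Int.floordiv ((t : Int) - m * (k + 1)) k with hbdef
      obtain ⟨hb0, hbz, hbl, hbr⟩ :=
        pv_classify k m z (t : Int) hz hk hm0 hmz (by omega) (by omega)
      rw [← hbdef] at hb0 hbz hbl hbr
      set st := (PySem.List.pyRange 0 z 1).map
            (fun i => PySem.Str.join "" (PySem.List.slice lines (some (pvStart k m i)) (some (min (t : Int) (pvStart k m (i + 1)))))) with hst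
      have hstlen : st.length = z.toNat := by
        simp [hst, PySem.List.length_pyRange_one]
      have hbnat : b.toNat < st.length := by omega
      show PySem.List.pySetD st b (PySem.List.pyGetD st b "" ++ x) = _
      rw [PySem.List.pySetD_of_nonneg st _ hb0,
          PySem.List.pyGetD_eq_getElem st "" hb0 (by rw [hstlen]; omega)]
      have hget : ∀ (c : Int) (q : Nat), q < z.toNat →
          ((PySem.List.pyRange 0 z 1).map
            (fun i => PySem.Str.join "" (PySem.List.slice lines (some (pvStart k m i)) (some (min c (pvStart k m (i + 1)))))))[q]?
          = some (PySem.Str.join "" (PySem.List.slice lines (some (pvStart k m (q : Int))) (some (min c (pvStart k m ((q : Int) + 1)))))) := by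
        intro c q hq
        rw [List.getElem?_map, PySem.List.getElem?_pyRange_one]
        simp only [Int.sub_zero]
        rw [if_pos (by omega)]
        simp only [Option.map_some]
        congr 3 <;> ring_nf
      apply List.ext_getElem?
      intro p
      by_cases hpz : p < z.toNat
      · rw [hget ((t : Int) + 1) p hpz]
        by_cases hpb : b.toNat = p
        · subst hpb
          rw [List.getElem?_set, if_pos rfl, if_pos hbnat]
          have hstp : st[b.toNat]'hbnat =
              PySem.Str.join "" (PySem.List.slice lines (some (pvStart k m (b.toNat : Int))) (some (min (t : Int) (pvStart k m ((b.toNat : Int) + 1))))) := by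
            have h := hget (t : Int) b.toNat hpz
            rw [← hst] at h
            rw [List.getElem?_eq_getElem hbnat] at h
            exact Option.some.inj h
          rw [hstp]
          have hpi : ((b.toNat : Nat) : Int) = b := by omega
          rw [hpi]
          have hminl : min (t : Int) (pvStart k m (b + 1)) = (t : Int) := by omega
          have hminr : min ((t : Int) + 1) (pvStart k m (b + 1)) = (t : Int) + 1 := by omega
          rw [hminl, hminr]
          have h0a : 0 ≤ pvStart k m b := by
            have := pvStart_mono k m hk (show (0 : Int) ≤ b by omega)
            rw [pvStart_zero k m hm0] at this
            omega
          rw [pv_slice_snoc lines (pvStart k m b) t h0a hbl ht, hx, pv_str_join_snoc]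
        · rw [List.getElem?_set_ne hpb, hst, hget (t : Int) p hpz]
          by_cases hplt : (p : Int) < b
          · -- block p is fully before t: both truncations give the full block
            have hend : pvStart k m ((p : Int) + 1) ≤ (t : Int) := by
              have := pvStart_mono k m hk (show (p : Int) + 1 ≤ b by omega)
              omega
            have h1 : min (t : Int) (pvStart k m ((p : Int) + 1)) = pvStart k m ((p : Int) + 1) := by omega
            have h2 : min ((t : Int) + 1) (pvStart k m ((p : Int) + 1)) = pvStart k m ((p : Int) + 1) := by omega
            rw [h1, h2]
          · -- block p starts after t: both truncated slices are empty
            have hpgt : b < (p : Int) := by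
              rcases lt_or_ge b (p : Int) with h | h
              · exact h
              · exfalso
                have : (p : Int) ≤ b - 1 := by omega
                have hbn : p ≤ b.toNat - 1 := by omega
                omega
            have hstartp : (t : Int) + 1 ≤ pvStart k m (p : Int) := by
              have := pvStart_mono k m hk (show b + 1 ≤ (p : Int) by omega)
              omega
            have h0p : 0 ≤ pvStart k m (p : Int) := by
              have := pvStart_mono k m hk (show (0 : Int) ≤ (p : Int) by omega)
              rw [pvStart_zero k m hm0] at this
              omega
            have hs0 : 0 ≤ pvStart k m ((p : Int) + 1) := by
              have := pvStart_mono k m hk (show (0 : Int) ≤ (p : Int) + 1 by omega)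
              rw [pvStart_zero k m hm0] at this
              omega
            rw [pv_slice_empty lines _ _ h0p (by omega) (by omega),
                pv_slice_empty lines _ _ h0p (by omega) (by omega)]
      · -- index past the z buckets: both sides are none
        rw [List.getElem?_eq_none (by rw [List.length_set, hstlen]; omega),
            List.getElem?_eq_none (by rw [List.length_map, PySem.List.length_pyRange_one]; omega)]
    rw [hstep]
    have := ih (t + 1) hrest
    have hcast : ((t + 1 : Nat) : Int) = (t : Int) + 1 := by push_cast; ring
    rw [hcast] at this
    exact this

-- ===== VERDICT (by name: the statement is the Claim_ definition above) =====
theorem partition_file_spec : Claim_equal_partition_file := by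
  intro z lines _ hpre
  unfold Spec_partition_file partition_file partition_file_alt
  rcases hpre with hz | ⟨hz, hnil⟩
  · -- z > 0: divmod succeeds; compare the two loops via the bucket invariant
    have hzne : z ≠ 0 := by omega
    simp only [PySem.Int.divmod?, hzne, ite_false]
    set k := ((lines.length : Int)).fdiv z with hkdef
    set m := ((lines.length : Int)).fmod z with hmdef
    have hm0 : 0 ≤ m := PySem.Int.mod_nonneg _ hz
    have hmz : m < z := PySem.Int.mod_lt _ hz
    have hn : k * z + m = (lines.length : Int) := PySem.Int.floordiv_mul_add_mod _ _
    have hk0 : 0 ≤ k := by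
      have h := PySem.Int.floordiv_eq_ediv_of_pos (a := (lines.length : Int)) hz
      have h2 : k = (lines.length : Int) / z := h
      rw [h2]
      exact Int.ediv_nonneg (by positivity) (by omega)
    rw [PySem.List.foldl_append_singleton_eq_map, List.nil_append, List.map_map]
    have hbase :
        (PySem.List.pyRepeat [""] z : List String)
          = (PySem.List.pyRange 0 z 1).map
              (fun i => PySem.Str.join "" (PySem.List.slice lines (some (pvStart k m i)) (some (min ((0 : Nat) : Int) (pvStart k m (i + 1)))))) := by
      rw [PySem.List.pyRepeat_singleton]
      apply List.ext_getElem
      · simp [PySem.List.length_pyRange_one]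
      · intro p hp hp'
        have hpz : p < z.toNat := by simpa using hp
        rw [List.getElem_replicate, List.getElem_map]
        set i := (PySem.List.pyRange 0 z 1)[p]'(by simp [PySem.List.length_pyRange_one]; omega) with hi
        have hi0 : 0 ≤ i := by
          have : i ∈ PySem.List.pyRange 0 z 1 := List.getElem_mem _
          rw [PySem.List.mem_pyRange_one] at this
          omega
        have h0p : 0 ≤ pvStart k m i := by
          have := pvStart_mono k m hk0 hi0
          rw [pvStart_zero k m hm0] at this
          omega
        have hmin : min ((0 : Nat) : Int) (pvStart k m (i + 1)) = 0 := by
          have := pvStart_mono k m hk0 (show i ≤ i + 1 by omega)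
          omega
        rw [hmin, pv_slice_empty lines _ _ h0p le_rfl (by omega)]
        simp [PySem.Str.join, PySem.Chars.join_nil]
    have hinv := pv_bucket_inv lines k m z hz hk0 hm0 hmz hn lines 0 (by simp)
    simp only [Nat.cast_zero] at hinv hbase
    rw [hbase, hinv]
    apply List.map_congr_left
    intro i hi
    simp only [Function.comp_apply]
    unfold pvStart
    ring_nf
  · -- z < 0 and lines = []: both sides are []
    subst hnil
    have hzne : z ≠ 0 := by omega
    simp only [PySem.Int.divmod?, hzne, ite_false]
    rw [PySem.List.pyRange_one_eq_nil (by omega)]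
    simp [PySem.List.pyRepeat_singleton, Int.toNat_of_nonpos (by omega : z ≤ 0)]
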